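-- pv_equiv track=rewrite | github.com/dknzippo/Source | lble_extractors.py | generate_uint16
-- ===== SOURCE A (Python) =====
-- def generate_uint16(s):
-- 	while True:
-- 		try:
-- 			v = (s[1]<<8) + s[0]
-- 			s = s[2:]
-- 		except IndexError:
-- 			return
-- 		yield v
-- ===== SOURCE B (Python) =====
-- def generate_uint16(s):
--     low = s[0::2]
--     high = s[1::2]
--     for lo, hi in zip(low, high):
--         yield (hi << 8) + lo
-- ===== Notes on version B (the rewrite author's own statement) =====
-- stated objective: faster
-- what changed: Replaces the while/try-except loop that re-slices the remaining tail each iteration (quadratic copying) with two strided views s[0::2] and s[1::2] zipped together; zip's stop-at-shorter rule replaces IndexError-based termination.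
import Mathlib
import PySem

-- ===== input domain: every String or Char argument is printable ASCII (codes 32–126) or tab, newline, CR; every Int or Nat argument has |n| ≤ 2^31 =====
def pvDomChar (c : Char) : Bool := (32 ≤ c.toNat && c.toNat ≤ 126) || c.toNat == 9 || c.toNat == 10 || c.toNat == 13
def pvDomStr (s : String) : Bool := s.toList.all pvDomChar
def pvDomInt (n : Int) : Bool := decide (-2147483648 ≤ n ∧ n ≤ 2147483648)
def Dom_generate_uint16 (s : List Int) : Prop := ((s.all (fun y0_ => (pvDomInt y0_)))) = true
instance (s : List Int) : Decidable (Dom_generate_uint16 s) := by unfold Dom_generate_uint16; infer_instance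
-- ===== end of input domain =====

-- B replaces A's while/try-except loop (which re-slices the tail each step) with two
-- strided slices s[0::2] and s[1::2] zipped together; idiomatic, same return values.


-- ===== PORT A =====
-- while True: try: v = (s[1]<<8) + s[0]; s = s[2:]; except IndexError: return; yield v
-- s[1] exists iff s has ≥ 2 elements (s[0] then exists too); s[2:] is List.drop 2,
-- i.e. `rest`; the generator's yields are collected into a list.
def generate_uint16 (s : List Int) : List Int :=
  match s with
  | a :: b :: rest => ((b <<< (8 : Nat)) + a) :: generate_uint16 rest
  | _ => []

-- ===== PORT B =====
-- low = s[0::2]; high = s[1::2]; for lo, hi in zip(low, high): yield (hi << 8) + lo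
-- slice? is total for step 2 (it is none only for step 0), so the last branch is unreachable.
def generate_uint16_alt (s : List Int) : List Int :=
  match PySem.List.slice? s (some 0) none 2, PySem.List.slice? s (some 1) none 2 with
  | some low, some high => (low.zip high).map (fun (p : Int × Int) => (p.2 <<< (8 : Nat)) + p.1)
  | _, _ => []

-- ===== PRECONDITION & SPEC =====
def Spec_generate_uint16 (s : List Int) (out : List Int) : Prop := out = generate_uint16_alt s
instance (s : List Int) (out : List Int) : Decidable (Spec_generate_uint16 s out) := by unfold Spec_generate_uint16; infer_instance

-- ===== CLAIM (what is proved, stated in full; the proofs are below) =====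
def Claim_equal_generate_uint16 : Prop := ∀ (s : List Int), Dom_generate_uint16 s → Spec_generate_uint16 s (generate_uint16 s)

-- ===== LEMMAS AND PROOFS =====

-- the elements at even positions of xs
def pvEvens : List Int → List Int
  | [] => []
  | [a] => [a]
  | a :: _ :: t => a :: pvEvens t

theorem pvEvens_cons_tail (b : Int) (t : List Int) :
    pvEvens (b :: t) = b :: pvEvens t.tail := by
  cases t <;> simp [pvEvens]

theorem filterMap_evens : ∀ xs : List Int,
    List.filterMap (fun k : Nat => xs[2 * k]?) (List.range ((xs.length + 1) / 2))
      = pvEvens xs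
  | [] => by simp [pvEvens]
  | [a] => by simp [pvEvens]
  | a :: b :: t => by
    have hlen : ((a :: b :: t).length + 1) / 2 = (t.length + 1) / 2 + 1 := by
      simp only [List.length_cons]; omega
    rw [hlen, List.range_succ_eq_map, List.filterMap_cons, List.filterMap_map]
    have hshift : ((fun k : Nat => (a :: b :: t)[2 * k]?) ∘ Nat.succ)
        = (fun k : Nat => t[2 * k]?) := by
      funext k
      have h2 : 2 * Nat.succ k = (2 * k + 1) + 1 := by omega
      simp [Function.comp, h2]
    rw [hshift, filterMap_evens t]
    simp [pvEvens]

theorem slice?_evens (xs : List Int) :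
    PySem.List.slice? xs (some 0) none 2 = some (pvEvens xs) := by
  simp only [PySem.List.slice?, PySem.List.sliceIndices]
  norm_num
  have hc : (if 0 < xs.length then ((((xs.length : Int)) + 2 - 1) / 2).toNat else 0)
      = (xs.length + 1) / 2 := by split <;> omega
  have hf : (fun x : Nat => xs[(2 * (x : Int)).toNat]?) = fun k : Nat => xs[2 * k]? := by
    funext k
    have h2 : (2 * (k : Int)).toNat = 2 * k := by omega
    rw [h2]
  rw [hc, hf]
  exact filterMap_evens xs
theorem slice?_odds (xs : List Int) :
    PySem.List.slice? xs (some 1) none 2 = some (pvEvens xs.tail) := by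
  cases xs with
  | nil => simp [PySem.List.slice?, PySem.List.sliceIndices, pvEvens]
  | cons a t =>
    simp only [PySem.List.slice?, PySem.List.sliceIndices]
    norm_num
    have hc : (if 0 < t.length then ((((t.length : Int)) + 2 - 1) / 2).toNat else 0)
        = (t.length + 1) / 2 := by split <;> omega
    have hf : (fun x : Nat => (a :: t)[(1 + 2 * (x : Int)).toNat]?)
        = fun k : Nat => t[2 * k]? := by
      funext k
      have h1 : (1 + 2 * (k : Int)).toNat = 2 * k + 1 := by omega
      simp [h1]
    rw [hc, hf]
    exact filterMap_evens t
theorem gen_eq_zip (xs : List Int) :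
    generate_uint16 xs
      = ((pvEvens xs).zip (pvEvens xs.tail)).map (fun (p : Int × Int) => (p.2 <<< (8 : Nat)) + p.1) := by
  match xs with
  | [] => simp [generate_uint16, pvEvens]
  | [a] => simp [generate_uint16, pvEvens]
  | a :: b :: t =>
    simp only [generate_uint16, List.tail_cons, pvEvens, pvEvens_cons_tail,
      List.zip_cons_cons, List.map_cons, gen_eq_zip t]

-- ===== VERDICT (by name: the statement is the Claim_ definition above) =====
theorem generate_uint16_spec : Claim_equal_generate_uint16 := by
  intro s _
  unfold Spec_generate_uint16 generate_uint16_alt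
  rw [slice?_evens, slice?_odds]
  exact gen_eq_zip s
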